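-- pv_equiv track=rewrite | github.com/theseven7h/PhaseGateOne | Python/studentgrade.py | get_highest_scores
-- ===== SOURCE A (Python) =====
-- def get_highest_scores(student_scores):
-- 	highest_scores = [0] * len(student_scores[0])
-- 	index = [0] * len(student_scores[0])
-- 	for i in range(len(student_scores[0])):
-- 		highest_scores[i] = student_scores[0][i]
-- 		index[i] = 1
-- 		for j in range(len(student_scores)):
-- 			if student_scores[j][i] > highest_scores[i]:
-- 				highest_scores[i] = student_scores[j][i]
-- 				index[i] = j + 1
-- 	return [highest_scores,index]
-- ===== SOURCE B (Python) =====
-- def get_highest_scores(student_scores):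
-- 	columns = [[student_scores[j][i] for j in range(len(student_scores))]
-- 	           for i in range(len(student_scores[0]))]
-- 	highest = [max(c) for c in columns]
-- 	index = [c.index(m) + 1 for c, m in zip(columns, highest)]
-- 	return [highest, index]
-- ===== Notes on version B (the rewrite author's own statement) =====
-- stated objective: simpler
-- what changed: Replaces the interleaved per-column running max+index scan with mutation of preallocated lists by an explicit transpose followed by max() and first-index lookup per column.
import Mathlib
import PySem

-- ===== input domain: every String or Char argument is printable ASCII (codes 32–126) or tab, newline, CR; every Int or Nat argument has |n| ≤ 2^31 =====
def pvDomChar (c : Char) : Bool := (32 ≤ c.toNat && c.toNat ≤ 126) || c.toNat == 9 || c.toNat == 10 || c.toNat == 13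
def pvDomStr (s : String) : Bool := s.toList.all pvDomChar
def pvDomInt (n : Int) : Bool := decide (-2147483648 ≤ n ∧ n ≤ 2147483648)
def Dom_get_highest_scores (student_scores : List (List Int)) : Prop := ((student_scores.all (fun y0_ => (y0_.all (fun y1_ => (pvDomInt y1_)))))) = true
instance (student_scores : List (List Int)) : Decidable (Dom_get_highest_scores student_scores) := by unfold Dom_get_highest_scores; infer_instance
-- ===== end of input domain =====

-- B replaces A's interleaved running max+index scan over preallocated mutable lists by an
-- explicit transpose followed by max() and a first-index lookup per column (same cost, simpler).

-- ===== PORT A =====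
def get_highest_scores (student_scores : List (List Int)) : List (List Int) :=
  let n := (PySem.List.pyGetD student_scores 0 ([] : List Int)).length
  let st := (PySem.List.pyRange 0 (n : Int) 1).foldl
    (fun (st : List Int × List Int) i =>
      let h := PySem.List.pySetD st.1 i
        (PySem.List.pyGetD (PySem.List.pyGetD student_scores 0 []) i 0)
      let idx := PySem.List.pySetD st.2 i 1
      (PySem.List.pyRange 0 (PySem.List.len student_scores) 1).foldl
        (fun (st2 : List Int × List Int) j =>
          if PySem.List.pyGetD (PySem.List.pyGetD student_scores j []) i 0 >
              PySem.List.pyGetD st2.1 i 0 then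
            (PySem.List.pySetD st2.1 i
               (PySem.List.pyGetD (PySem.List.pyGetD student_scores j []) i 0),
             PySem.List.pySetD st2.2 i (j + 1))
          else st2)
        (h, idx))
    (PySem.List.pyRepeat [(0 : Int)] (n : Int), PySem.List.pyRepeat [(0 : Int)] (n : Int))
  [st.1, st.2]

-- ===== PORT B =====
def get_highest_scores_alt (student_scores : List (List Int)) : List (List Int) :=
  let columns := (PySem.List.pyRange 0 (PySem.List.len (PySem.List.pyGetD student_scores 0 ([] : List Int))) 1).map
    (fun i => (PySem.List.pyRange 0 (PySem.List.len student_scores) 1).map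
      (fun j => PySem.List.pyGetD (PySem.List.pyGetD student_scores j []) i 0))
  let highest := columns.map (fun c => (PySem.List.max? c (fun y => y)).getD 0)
  let index := (columns.zip highest).map
    (fun p => ((PySem.List.index? p.1 p.2).getD 0 : Int) + 1)
  [highest, index]

-- ===== PRECONDITION & SPEC =====
-- Pre_ excludes exactly the inputs on which A raises IndexError: the empty outer list
-- (student_scores[0]) and jagged inputs with some row shorter than row 0.
def Pre_get_highest_scores (student_scores : List (List Int)) : Prop :=
  student_scores ≠ [] ∧
    ∀ row ∈ student_scores, (student_scores.headD []).length ≤ row.length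
instance (student_scores : List (List Int)) : Decidable (Pre_get_highest_scores student_scores) := by
  unfold Pre_get_highest_scores; infer_instance
def pvWitness_get_highest_scores : List (List Int) := [[1, 2], [3, 1], [2, 2]]

def Spec_get_highest_scores (student_scores : List (List Int)) (out : List (List Int)) : Prop := out = get_highest_scores_alt student_scores
instance (student_scores : List (List Int)) (out : List (List Int)) : Decidable (Spec_get_highest_scores student_scores out) := by unfold Spec_get_highest_scores; infer_instance

-- ===== CLAIM (what is proved, stated in full; the proofs are below) =====
def Claim_equal_get_highest_scores : Prop := ∀ (student_scores : List (List Int)), Dom_get_highest_scores student_scores → Pre_get_highest_scores student_scores → Spec_get_highest_scores student_scores (get_highest_scores student_scores)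

-- ===== LEMMAS AND PROOFS =====

def pvQ (p : Int × Int) (jx : Int × Int) : Int × Int :=
  if jx.2 > p.1 then (jx.2, jx.1 + 1) else p

def pvF (k : Nat) (p : Int × Int) (jr : Int × List Int) : Int × Int :=
  if jr.2.getD k 0 > p.1 then (jr.2.getD k 0, jr.1 + 1) else p

def pvCol (ss : List (List Int)) (k : Nat) : List Int := ss.map (fun row => row.getD k 0)

def pvRes (ss : List (List Int)) (k : Nat) : Int × Int :=
  (PySem.List.enumerate ss 0).foldl (pvF k) ((PySem.List.pyGetD ss 0 []).getD k 0, 1)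

lemma pv_idxOf?_of_mem (c : List Int) (M : Int) (h : M ∈ c) : c.idxOf? M = some (c.idxOf M) := by
  induction c with
  | nil => simp at h
  | cons x t ih =>
    by_cases hx : x = M
    · subst hx; simp [List.idxOf?_cons, List.idxOf_cons_self]
    · rcases List.mem_cons.mp h with h1 | h2
      · exact absurd h1.symm hx
      · simp [List.idxOf?_cons, List.idxOf_cons_ne _ hx, hx, ih h2]

lemma pv_foldl_max_of_le (t : List Int) (a : Int) (h : ∀ y ∈ t, y ≤ a) : t.foldl max a = a := by
  rcases PySem.List.foldl_max_mem t a with h1 | h1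
  · exact h1
  · exact le_antisymm (h _ h1) (PySem.List.le_foldl_max t a).1

lemma pv_lt_foldl_max (t : List Int) (a : Int) (h : ¬ ∀ y ∈ t, y ≤ a) : a < t.foldl max a := by
  push Not at h
  obtain ⟨y, hy, hay⟩ := h
  exact lt_of_lt_of_le hay ((PySem.List.le_foldl_max t a).2 y hy)

lemma pv_enum_cons (x : α) (xs : List α) (s : Int) :
    PySem.List.enumerate (x::xs) s = (s,x) :: PySem.List.enumerate xs (s+1) := by
  simp [PySem.List.enumerate]

lemma pv_scan (t : List Int) (s a b : Int) :
    (PySem.List.enumerate t s).foldl pvQ (a, b) =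
      if ∀ x ∈ t, x ≤ a then (a, b)
      else (t.foldl max a, s + (t.idxOf (t.foldl max a) : Int) + 1) := by
  induction t generalizing s a b with
  | nil => simp [PySem.List.enumerate]
  | cons x t ih =>
    rw [pv_enum_cons, List.foldl_cons]
    by_cases hx : x > a
    · rw [show pvQ (a,b) (s,x) = (x, s+1) by simp [pvQ, hx], ih]
      have hne : ¬ ∀ y ∈ x::t, y ≤ a := by
        push Not; exact ⟨x, List.mem_cons_self, hx⟩
      have hfold : (x::t).foldl max a = t.foldl max x := by
        rw [List.foldl_cons, max_eq_right (le_of_lt hx)]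
      by_cases hall : ∀ y ∈ t, y ≤ x
      · rw [if_pos hall, if_neg hne, hfold, pv_foldl_max_of_le t x hall,
          List.idxOf_cons_self]
        simp
      · rw [if_neg hall, if_neg hne, hfold]
        have hxM : x < t.foldl max x := pv_lt_foldl_max t x hall
        rw [List.idxOf_cons_ne _ (ne_of_lt hxM)]
        congr 1; push_cast; ring
    · rw [show pvQ (a,b) (s,x) = (a,b) by simp [pvQ, hx], ih]
      have hxa : x ≤ a := not_lt.mp hx
      have hfold : (x::t).foldl max a = t.foldl max a := by
        rw [List.foldl_cons, max_eq_left hxa]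
      by_cases hall : ∀ y ∈ t, y ≤ a
      · rw [if_pos hall, if_pos (by
          intro y hy
          rcases List.mem_cons.mp hy with h1 | h2
          · exact h1 ▸ hxa
          · exact hall y h2)]
      · have hne : ¬ ∀ y ∈ x::t, y ≤ a := by
          intro hc; exact hall (fun y hy => hc y (List.mem_cons_of_mem _ hy))
        rw [if_neg hall, if_neg hne, hfold]
        have haM : a < t.foldl max a := pv_lt_foldl_max t a hall
        rw [List.idxOf_cons_ne _ (ne_of_lt (lt_of_le_of_lt hxa haM))]
        congr 1; push_cast; ring

lemma pv_enum_map (g : α → β) (l : List α) (s : Int) :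
    PySem.List.enumerate (l.map g) s = (PySem.List.enumerate l s).map (fun p => (p.1, g p.2)) := by
  induction l generalizing s with
  | nil => simp [PySem.List.enumerate]
  | cons x t ih => rw [List.map_cons, pv_enum_cons, pv_enum_cons, List.map_cons, ih]

lemma pv_fold_rows_eq_col (ss : List (List Int)) (k : Nat) (a b : Int) :
    (PySem.List.enumerate ss 0).foldl (pvF k) (a, b)
    = (PySem.List.enumerate (pvCol ss k) 0).foldl pvQ (a, b) := by
  rw [pvCol, pv_enum_map, List.foldl_map]
  rfl

lemma pv_col_eval (r0 : List Int) (rest : List (List Int)) (k : Nat) :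
    pvRes (r0::rest) k
    = ((PySem.List.max? (pvCol (r0::rest) k) (fun y => y)).getD 0,
       ((PySem.List.index? (pvCol (r0::rest) k)
          ((PySem.List.max? (pvCol (r0::rest) k) (fun y => y)).getD 0)).getD 0 : Int) + 1) := by
  rw [pvRes, PySem.List.pyGetD_zero_cons, pv_fold_rows_eq_col]
  have hc : pvCol (r0::rest) k = r0.getD k 0 :: pvCol rest k := by simp [pvCol]
  rw [hc, pv_enum_cons, List.foldl_cons,
    show pvQ (r0.getD k 0, 1) (0, r0.getD k 0) = (r0.getD k 0, 1) by simp [pvQ],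
    pv_scan, PySem.List.max?_id_cons]
  set v := r0.getD k 0
  set t := pvCol rest k
  by_cases hall : ∀ x ∈ t, x ≤ v
  · rw [if_pos hall, pv_foldl_max_of_le t v hall]
    simp only [Option.getD_some]
    rw [show PySem.List.index? (v :: t) v = some 0 from PySem.List.index?_cons_self v t]
    simp
  · rw [if_neg hall]
    have hvM : v < t.foldl max v := pv_lt_foldl_max t v hall
    have hMt : t.foldl max v ∈ t := by
      rcases PySem.List.foldl_max_mem t v with h1 | h1
      · exact absurd h1 (by intro h; exact absurd (h ▸ hvM) (lt_irrefl _))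
      · exact h1
    simp only [Option.getD_some]
    rw [PySem.List.index?_cons_of_ne t (ne_of_lt hvM),
      PySem.List.index?_eq_idxOf?, pv_idxOf?_of_mem t _ hMt]
    simp only [Option.getD_some, Option.map_some]
    congr 1
    push_cast
    ring

lemma pv_inner (L : List (Int × List Int)) (k : Nat) (H I : List Int)
    (hH : k < H.length) (a b : Int) :
    L.foldl (fun (st2 : List Int × List Int) jr =>
        if jr.2.getD k 0 > st2.1.getD k 0 then
          (st2.1.set k (jr.2.getD k 0), st2.2.set k (jr.1 + 1))
        else st2)
      (H.set k a, I.set k b)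
    = (H.set k ((L.foldl (pvF k) (a, b)).1), I.set k ((L.foldl (pvF k) (a, b)).2)) := by
  induction L generalizing a b with
  | nil => simp
  | cons jr L ih =>
    simp only [List.foldl_cons, pvF]
    have hget : (H.set k a).getD k 0 = a := by simp [List.getD, hH]
    by_cases hcond : jr.2.getD k 0 > a
    · rw [if_pos (by rw [hget]; exact hcond), List.set_set, List.set_set, ih, if_pos hcond]
    · rw [if_neg (by rw [hget]; exact hcond), ih, if_neg hcond]

lemma pv_inner_range (ss : List (List Int)) (k : Nat) (H I : List Int)
    (hH : k < H.length) (a b : Int) :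
    (PySem.List.pyRange 0 (PySem.List.len ss) 1).foldl
      (fun (st2 : List Int × List Int) j =>
        if (PySem.List.pyGetD ss j []).getD k 0 > st2.1.getD k 0 then
          (st2.1.set k ((PySem.List.pyGetD ss j []).getD k 0), st2.2.set k (j + 1))
        else st2)
      (H.set k a, I.set k b)
    = (H.set k (((PySem.List.enumerate ss 0).foldl (pvF k) (a, b)).1),
       I.set k (((PySem.List.enumerate ss 0).foldl (pvF k) (a, b)).2)) := by
  have h1 : (PySem.List.enumerate ss 0).foldl
      (fun (st2 : List Int × List Int) jr =>
        if jr.2.getD k 0 > st2.1.getD k 0 then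
          (st2.1.set k (jr.2.getD k 0), st2.2.set k (jr.1 + 1))
        else st2) (H.set k a, I.set k b)
      = (PySem.List.pyRange 0 (PySem.List.len ss) 1).foldl
      (fun (st2 : List Int × List Int) j =>
        if (PySem.List.pyGetD ss j []).getD k 0 > st2.1.getD k 0 then
          (st2.1.set k ((PySem.List.pyGetD ss j []).getD k 0), st2.2.set k (j + 1))
        else st2)
      (H.set k a, I.set k b) := by
    rw [PySem.List.enumerate_eq_map_pyRange (d := ([] : List Int)), List.foldl_map]
  rw [← h1, pv_inner _ k H I hH a b]

lemma pv_set_map_range (n t : Nat) (g : Nat → Int) (ht : t < n) :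
    ((List.range n).map (fun k => if k < t then g k else 0)).set t (g t)
    = (List.range n).map (fun k => if k < t + 1 then g k else 0) := by
  apply List.ext_getElem (by simp)
  intro i h1 h2
  simp only [List.getElem_set, List.getElem_map, List.getElem_range,
    List.length_map, List.length_range] at *
  by_cases hi : i = t
  · subst hi; simp
  · rw [if_neg (by omega : ¬ t = i)]
    by_cases h3 : i < t
    · rw [if_pos h3, if_pos (by omega)]
    · rw [if_neg h3, if_neg (by omega)]

lemma pv_outer (ss : List (List Int)) (t : Nat)
    (ht : t ≤ (PySem.List.pyGetD ss 0 ([] : List Int)).length) :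
    (PySem.List.pyRange 0 (t : Int) 1).foldl
      (fun (st : List Int × List Int) i =>
        (PySem.List.pyRange 0 (PySem.List.len ss) 1).foldl
          (fun (st2 : List Int × List Int) j =>
            if PySem.List.pyGetD (PySem.List.pyGetD ss j []) i 0 >
                PySem.List.pyGetD st2.1 i 0 then
              (PySem.List.pySetD st2.1 i (PySem.List.pyGetD (PySem.List.pyGetD ss j []) i 0),
               PySem.List.pySetD st2.2 i (j + 1))
            else st2)
          (PySem.List.pySetD st.1 i (PySem.List.pyGetD (PySem.List.pyGetD ss 0 []) i 0),
           PySem.List.pySetD st.2 i 1))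
      (List.replicate (PySem.List.pyGetD ss 0 ([] : List Int)).length 0,
       List.replicate (PySem.List.pyGetD ss 0 ([] : List Int)).length 0)
    = ((List.range (PySem.List.pyGetD ss 0 ([] : List Int)).length).map
         (fun k => if k < t then (pvRes ss k).1 else 0),
       (List.range (PySem.List.pyGetD ss 0 ([] : List Int)).length).map
         (fun k => if k < t then (pvRes ss k).2 else 0)) := by
  set n := (PySem.List.pyGetD ss 0 ([] : List Int)).length with hn
  induction t with
  | zero =>
    rw [show ((0 : Nat) : Int) = 0 by norm_num, PySem.List.pyRange_one_eq_nil (le_refl 0)]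
    simp [List.map_const']
  | succ t iht =>
    have ht' : t ≤ n := Nat.le_of_succ_le ht
    rw [show ((t + 1 : Nat) : Int) = (t : Int) + 1 by push_cast; ring,
      PySem.List.pyRange_one_succ_right (by positivity), List.foldl_append,
      iht ht', List.foldl_cons, List.foldl_nil]
    have htn : t < n := ht
    have hlen : t < ((List.range n).map (fun k => if k < t then (pvRes ss k).1 else 0)).length := by
      simp [htn]
    simp only [PySem.List.pySetD_natCast, PySem.List.pyGetD_natCast]
    rw [pv_inner_range ss t _ _ hlen]
    rw [show ((PySem.List.enumerate ss 0).foldl (pvF t)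
        ((PySem.List.pyGetD ss 0 []).getD t 0, 1)) = pvRes ss t from rfl]
    rw [pv_set_map_range n t (fun k => (pvRes ss k).1) htn,
      pv_set_map_range n t (fun k => (pvRes ss k).2) htn]

lemma pv_A_eval (ss : List (List Int)) :
    get_highest_scores ss
    = [(List.range (PySem.List.pyGetD ss 0 ([] : List Int)).length).map (fun k => (pvRes ss k).1),
       (List.range (PySem.List.pyGetD ss 0 ([] : List Int)).length).map (fun k => (pvRes ss k).2)] := by
  simp only [get_highest_scores, PySem.List.pyRepeat_singleton, Int.toNat_natCast]
  rw [pv_outer ss (PySem.List.pyGetD ss 0 ([] : List Int)).length (le_refl _)]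
  have h1 : ∀ (g : Nat → Int),
      (List.range (PySem.List.pyGetD ss 0 ([] : List Int)).length).map
        (fun k => if k < (PySem.List.pyGetD ss 0 ([] : List Int)).length then g k else 0)
      = (List.range (PySem.List.pyGetD ss 0 ([] : List Int)).length).map g :=
    fun g => List.map_congr_left (fun k hk => if_pos (List.mem_range.mp hk))
  simp [h1]

lemma pv_col_map' (ss : List (List Int)) (k : Nat) :
    (List.range ss.length).map (fun j => (ss.getD j []).getD k 0) = pvCol ss k := by
  rw [pvCol]
  apply List.ext_getElem (by simp)
  intro i h1 h2
  simp only [List.getElem_map, List.getElem_range]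
  rw [List.getD_eq_getElem ss [] (by simpa using h2)]

lemma pv_B_eval (ss : List (List Int)) :
    get_highest_scores_alt ss
    = [(List.range (PySem.List.pyGetD ss 0 ([] : List Int)).length).map
         (fun k => (PySem.List.max? (pvCol ss k) (fun y => y)).getD 0),
       (List.range (PySem.List.pyGetD ss 0 ([] : List Int)).length).map
         (fun k => ((PySem.List.index? (pvCol ss k)
            ((PySem.List.max? (pvCol ss k) (fun y => y)).getD 0)).getD 0 : Int) + 1)] := by
  simp only [get_highest_scores_alt, PySem.List.len_eq, PySem.List.pyRange_zero_natCast,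
    List.map_map, Function.comp_def, PySem.List.pyGetD_natCast, pv_col_map',
    List.zip_map']

-- ===== VERDICT (by name: the statement is the Claim_ definition above) =====
theorem get_highest_scores_spec : Claim_equal_get_highest_scores := by
  intro ss _ hpre
  unfold Spec_get_highest_scores
  obtain ⟨r0, rest, rfl⟩ : ∃ r0 rest, ss = r0 :: rest :=
    List.ne_nil_iff_exists_cons.mp hpre.1
  rw [pv_A_eval, pv_B_eval]
  congr 1
  · exact List.map_congr_left (fun k _ => by rw [pv_col_eval])
  congr 1
  exact List.map_congr_left (fun k _ => by rw [pv_col_eval])
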